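-- pv_equiv track=rewrite | github.com/leehj24/Coding_Test | Level.0_py/89번.py | solution
-- ===== SOURCE A (Python) =====
-- def solution(myString, pat):
--     answer=''
--     for i in myString:
--         if i =='A':
--             answer +='B'
--         elif i =='B':
--             answer += 'A'
--         else:
--             answer +=i
--     return int(pat in answer)
-- ===== SOURCE B (Python) =====
-- def solution(myString, pat):
--     # direct sliding-window search: compare pat against each window of myString
--     # with a crossed comparator (A matches B, B matches A, others match themselves);
--     # no transformed string is ever built and no builtin substring test is used.
--     def match(c, p):
--         if c == 'A':
--             return p == 'B'
--         if c == 'B':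
--             return p == 'A'
--         return c == p
--     m = len(pat)
--     for i in range(len(myString) - m + 1):
--         if all(match(myString[i + j], pat[j]) for j in range(m)):
--             return 1
--     return 0
-- ===== Notes on version B (the rewrite author's own statement) =====
-- stated objective: alternative
-- what changed: A builds the A/B-swapped copy of myString character by character and uses the builtin substring test; B builds no transformed string at all: it runs an explicit naive sliding-window search, comparing pat against each window of myString with a crossed comparator (A matches B, B matches A, others match themselves).
import Mathlib
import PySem

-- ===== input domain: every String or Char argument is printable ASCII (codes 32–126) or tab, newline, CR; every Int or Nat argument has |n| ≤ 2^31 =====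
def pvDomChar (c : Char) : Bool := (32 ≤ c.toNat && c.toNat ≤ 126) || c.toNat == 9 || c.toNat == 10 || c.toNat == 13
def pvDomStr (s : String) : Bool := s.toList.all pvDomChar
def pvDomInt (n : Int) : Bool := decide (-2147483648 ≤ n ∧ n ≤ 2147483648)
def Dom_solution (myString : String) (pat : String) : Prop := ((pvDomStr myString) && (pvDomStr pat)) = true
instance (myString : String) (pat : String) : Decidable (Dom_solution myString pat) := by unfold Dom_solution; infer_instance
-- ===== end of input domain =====

-- B replaces A's transform-then-builtin-membership by an explicit naive window search with a crossed A/B comparator; objective: alternative.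


-- ===== PORT A =====
-- the per-character A/B swap in A's if/elif/else chain
def pvSwapAB (c : Char) : Char := if c = 'A' then 'B' else if c = 'B' then 'A' else c

-- string building ported at the Chars (List Char) level, as PySem prescribes
def solution (myString : String) (pat : String) : Int :=
  let answer := myString.toList.foldl (fun acc i => acc ++ [pvSwapAB i]) []
  if PySem.Chars.isIn pat.toList answer then 1 else 0

-- ===== PORT B =====
-- Source B's crossed comparator match(c, p)
def pvMatch (c p : Char) : Bool :=
  if c = 'A' then p = 'B' else if c = 'B' then p = 'A' else c = p

-- Source B's inner 'all(match(myString[i+j], pat[j]) for j in range(m))' at window start s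
def pvStarts : List Char → List Char → Bool
  | _, [] => true
  | [], _ :: _ => false
  | c :: cs, p :: ps => pvMatch c p && pvStarts cs ps

-- Source B's outer loop over window starts i = 0 .. n-m (each suffix of myString)
def pvSearch (s p : List Char) : Bool :=
  match s with
  | [] => pvStarts [] p
  | _ :: cs => pvStarts s p || pvSearch cs p

def solution_alt (myString : String) (pat : String) : Int :=
  if pvSearch myString.toList pat.toList then 1 else 0

-- ===== PRECONDITION & SPEC =====
def Spec_solution (myString : String) (pat : String) (out : Int) : Prop := out = solution_alt myString pat
instance (myString : String) (pat : String) (out : Int) : Decidable (Spec_solution myString pat out) := by unfold Spec_solution; infer_instance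

-- ===== CLAIM (what is proved, stated in full; the proofs are below) =====
def Claim_equal_solution : Prop := ∀ (myString : String) (pat : String), Dom_solution myString pat → Spec_solution myString pat (solution myString pat)

-- ===== LEMMAS AND PROOFS =====
-- the crossed comparator is exactly "swap of the text char equals the pattern char"
theorem pvMatch_eq (c p : Char) : pvMatch c p = decide (pvSwapAB c = p) := by
  unfold pvMatch pvSwapAB
  by_cases h1 : c = 'A' <;> by_cases h2 : c = 'B' <;> simp [h1, h2, eq_comm]

theorem pvStarts_iff (s p : List Char) :
    pvStarts s p = true ↔ p <+: s.map pvSwapAB := by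
  induction p generalizing s with
  | nil => simp [pvStarts]
  | cons ph pt ih =>
    cases s with
    | nil => simp [pvStarts]
    | cons c cs =>
      show (pvMatch c ph && pvStarts cs pt) = true ↔ _
      rw [Bool.and_eq_true, pvMatch_eq, ih]
      simp [List.cons_prefix_cons, eq_comm]

theorem pvSearch_iff (s p : List Char) :
    pvSearch s p = true ↔ p <:+: s.map pvSwapAB := by
  induction s with
  | nil => simp [pvSearch, pvStarts_iff]
  | cons c cs ih =>
    simp [pvSearch, pvStarts_iff, ih, List.infix_cons_iff]

theorem solution_eq_alt (myString pat : String) :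
    solution myString pat = solution_alt myString pat := by
  unfold solution solution_alt
  have hfold : myString.toList.foldl (fun acc i => acc ++ [pvSwapAB i]) [] =
      myString.toList.map pvSwapAB := by
    simpa using PySem.List.foldl_append_singleton_eq_map (f := pvSwapAB) (l := myString.toList) ([] : List Char)
  have hiff : PySem.Chars.isIn pat.toList (myString.toList.map pvSwapAB) = true ↔
      pvSearch myString.toList pat.toList = true := by
    rw [PySem.Chars.isIn_iff_infix, pvSearch_iff]
  simp only [hfold]
  rcases hb : pvSearch myString.toList pat.toList with _ | _
  · simp [(Bool.eq_false_iff.mpr (fun h => (Bool.eq_false_iff.mp hb) (hiff.mp h)))]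
  · simp [hiff.mpr hb]

-- ===== VERDICT (by name: the statement is the Claim_ definition above) =====
theorem solution_spec : Claim_equal_solution := by
  intro myString pat _
  exact solution_eq_alt myString pat
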